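-- pv_equiv track=rewrite | github.com/xmadsen/adventofcode | 2017/day3_2017.py | which_layer
-- ===== SOURCE A (Python) =====
-- def nth_odd(n):
--     return(n * 2 - 1)
--
-- def get_middle_values(layer=1):
--     if layer == 1:
--         return([1])
--     else:
--         output = [1, 1, 1, 1]
--         for i in range(0,layer-1):
--             output[0] += nth_odd(4*i+1)
--             output[1] += nth_odd(4*i+2)
--             output[2] += nth_odd(4*i+3)
--             output[3] += nth_odd(4*i+4)
--         return(output)
--
-- def which_layer(val=1):
--     if val == 1:
--         return(1)
--     elif val <= 9:
--         return(2)
--     else: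
--         i = 1
--         while val not in range(min(get_middle_values(i))-(i-2), max(get_middle_values(i))+i):
--             i += 1
--         return(i)
-- ===== SOURCE B (Python) =====
-- def which_layer(val=1):
--     # The innermost layer holds only the cell 1; otherwise the answer is the
--     # smallest subsequent ring whose largest value, an odd square, reaches val.
--     if val == 1:
--         return 1
--     k = 2
--     while (2 * k - 1) ** 2 < val:
--         k += 1
--     return k
-- ===== Notes on version B (the rewrite author's own statement) =====
-- stated objective: faster
-- what changed: B drops A's per-candidate reconstruction of the ring's four middle values (an O(i) inner loop plus min/max over them) and instead compares val directly with the ring's last value, the odd square (2k-1)**2, in a single increment-and-test loop.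
import Mathlib
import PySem

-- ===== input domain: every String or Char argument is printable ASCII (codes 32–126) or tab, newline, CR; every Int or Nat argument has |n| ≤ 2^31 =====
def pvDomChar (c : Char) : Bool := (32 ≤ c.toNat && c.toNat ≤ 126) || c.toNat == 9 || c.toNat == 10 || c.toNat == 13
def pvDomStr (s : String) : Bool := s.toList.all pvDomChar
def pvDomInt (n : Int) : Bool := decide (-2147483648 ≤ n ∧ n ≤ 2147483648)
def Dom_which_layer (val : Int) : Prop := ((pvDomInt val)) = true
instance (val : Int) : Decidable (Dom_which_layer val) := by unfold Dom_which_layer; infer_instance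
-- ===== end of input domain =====

-- B replaces A's per-layer rebuild of the four middle values (inner loop + min/max)
-- by a direct comparison of val with the ring's odd square (2k-1)^2: faster, same values.

-- ===== PORT A =====
def nth_odd (n : Int) : Int := n * 2 - 1

-- the body of A's 'for i in range(0, layer-1)' loop (list always has 4 elements; other branch unreachable)
def gmv_step (output : List Int) (i : Int) : List Int :=
  match output with
  | [o0, o1, o2, o3] =>
      [o0 + nth_odd (4*i+1), o1 + nth_odd (4*i+2), o2 + nth_odd (4*i+3), o3 + nth_odd (4*i+4)]
  | other => other

def get_middle_values (layer : Int) : List Int :=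
  if layer = 1 then [1]
  else (PySem.List.pyRange 0 (layer - 1) 1).foldl gmv_step [1, 1, 1, 1]

-- A's 'while val not in range(min(...)-(i-2), max(...)+i): i += 1; return i'.
-- Fuel only makes the loop total; val.toNat + 1 steps always suffice on the inputs A returns on.
-- min/max are over a nonempty literal list, so .getD 0 is never the default.
def which_layer_loop (val : Int) : Nat → Int → Int
  | 0, i => i
  | fuel+1, i =>
    let lo := (PySem.List.min? (get_middle_values i) (fun y => y)).getD 0 - (i - 2)
    let hi := (PySem.List.max? (get_middle_values i) (fun y => y)).getD 0 + i
    if lo ≤ val ∧ val < hi then i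
    else which_layer_loop val fuel (i + 1)

def which_layer (val : Int) : Int :=
  if val = 1 then 1
  else if val ≤ 9 then 2
  else which_layer_loop val (val.toNat + 1) 1

-- ===== PORT B =====
-- Source B's 'while (2*k-1)**2 < val: k += 1'; fuel only makes it total (val.toNat steps suffice).
def which_layer_alt_loop (val : Int) : Nat → Int → Int
  | 0, k => k
  | fuel+1, k => if (2*k - 1)^2 < val then which_layer_alt_loop val fuel (k+1) else k

def which_layer_alt (val : Int) : Int :=
  if val = 1 then 1
  else which_layer_alt_loop val val.toNat 2

-- ===== PRECONDITION & SPEC =====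
def Spec_which_layer (val : Int) (out : Int) : Prop := out = which_layer_alt val
instance (val : Int) (out : Int) : Decidable (Spec_which_layer val out) := by unfold Spec_which_layer; infer_instance

-- ===== CLAIM (what is proved, stated in full; the proofs are below) =====
def Claim_equal_which_layer : Prop := ∀ (val : Int), Dom_which_layer val → Spec_which_layer val (which_layer val)

-- ===== LEMMAS AND PROOFS =====

theorem gmv_fold (n : Nat) :
    (PySem.List.pyRange 0 (n : Int) 1).foldl gmv_step [1, 1, 1, 1]
      = [4*(n:Int)^2 - 3*n + 1, 4*(n:Int)^2 - n + 1, 4*(n:Int)^2 + n + 1, 4*(n:Int)^2 + 3*n + 1] := by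
  induction n with
  | zero => simp [PySem.List.pyRange_one_eq_nil]
  | succ m ih =>
    have h : ((m+1 : Nat) : Int) = (m : Int) + 1 := by push_cast; ring
    rw [h, PySem.List.pyRange_one_succ_right (by positivity)]
    rw [List.foldl_append, ih]
    simp only [List.foldl, gmv_step, nth_odd]
    simp only [List.cons.injEq, and_true]
    and_intros <;> ring

theorem gmv_closed (k : Int) (hk : 2 ≤ k) :
    get_middle_values k
      = [(2*k-3)^2 + (k-1), (2*k-3)^2 + 3*(k-1), (2*k-3)^2 + 5*(k-1), (2*k-3)^2 + 7*(k-1)] := by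
  unfold get_middle_values
  rw [if_neg (by omega)]
  have hn : ((k - 1).toNat : Int) = k - 1 := Int.toNat_of_nonneg (by omega)
  rw [show (k - 1) = (((k-1).toNat : Nat) : Int) from hn.symm, gmv_fold]
  rw [hn]
  simp only [List.cons.injEq, and_true]
  and_intros <;> ring

theorem alt_loop_stop (val k : Int) (fuel : Nat) (h : ¬ (2*k - 1)^2 < val) :
    which_layer_alt_loop val fuel k = k := by
  cases fuel with
  | zero => rfl
  | succ m => simp [which_layer_alt_loop, h]

theorem lockstep (val : Int) (fuel : Nat) :
    ∀ k : Int, 2 ≤ k → (2*k-3)^2 < val →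
      which_layer_loop val fuel k = which_layer_alt_loop val fuel k := by
  induction fuel with
  | zero => intro k _ _; rfl
  | succ m ih =>
    intro k hk hlt
    have hmm := gmv_closed k hk
    have hmin : PySem.List.min? (get_middle_values k) (fun y => y) = some ((2*k-3)^2 + (k-1)) := by
      rw [hmm, PySem.List.min?_id_cons]
      congr 1
      simp only [List.foldl]
      omega
    have hmax : PySem.List.max? (get_middle_values k) (fun y => y) = some ((2*k-3)^2 + 7*(k-1)) := by
      rw [hmm, PySem.List.max?_id_cons]
      congr 1
      simp only [List.foldl]
      omega
    show (if _ ≤ val ∧ val < _ then k else which_layer_loop val m (k+1))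
        = which_layer_alt_loop val (m+1) k
    rw [hmin, hmax]
    simp only [Option.getD_some]
    by_cases hstop : val ≤ (2*k - 1)^2
    · rw [if_pos ⟨by nlinarith, by nlinarith⟩]
      rw [alt_loop_stop val k (m+1) (by omega)]
    · rw [if_neg (by intro ⟨_, h2⟩; nlinarith)]
      rw [show which_layer_alt_loop val (m+1) k = which_layer_alt_loop val m (k+1) by
        simp [which_layer_alt_loop, show (2*k-1)^2 < val by omega]]
      exact ih (k+1) (by omega) (by nlinarith)

-- ===== VERDICT (by name: the statement is the Claim_ definition above) =====
theorem which_layer_spec : Claim_equal_which_layer := by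
  intro val _
  unfold Spec_which_layer which_layer which_layer_alt
  by_cases h1 : val = 1
  · simp [h1]
  · rw [if_neg h1, if_neg h1]
    by_cases h9 : val ≤ 9
    · rw [if_pos h9, alt_loop_stop val 2 val.toNat (by norm_num; omega)]
    · rw [if_neg h9]
      have hgm1 : get_middle_values 1 = [1] := by simp [get_middle_values]
      have hstep : which_layer_loop val (val.toNat + 1) 1 = which_layer_loop val val.toNat 2 := by
        simp only [which_layer_loop, hgm1, PySem.List.min?_id_cons, PySem.List.max?_id_cons]
        rw [if_neg (by simp only [List.foldl]; omega)]
        norm_num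
      rw [hstep]
      exact lockstep val val.toNat 2 (by norm_num) (by norm_num; omega)
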